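-- pv_equiv track=rewrite | github.com/bkawk/harness-lab | src/harness_lab/big_bang.py | _candidate_lookup_order
-- ===== SOURCE A (Python) =====
-- def _candidate_lookup_order(index: dict, state: dict) -> list[str]:
--     ordered: list[str] = []
--     seen: set[str] = set()
--     for candidate_id in (
--         str(state.get("active_candidate_id", "") or ""),
--         str(state.get("last_candidate_id", "") or ""),
--     ):
--         if candidate_id and candidate_id not in seen:
--             ordered.append(candidate_id)
--             seen.add(candidate_id)
--     for item in reversed(list(index.get("candidates", []))):
--         candidate_id = str(item.get("candidate_id", "") or "")
--         if candidate_id and candidate_id not in seen: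
--             ordered.append(candidate_id)
--             seen.add(candidate_id)
--     return ordered
-- ===== SOURCE B (Python) =====
-- def _dedup(ids):
--     # keep the head, drop its later duplicates from the recursively deduped tail
--     if not ids:
--         return []
--     head, rest = ids[0], _dedup(ids[1:])
--     if not head:
--         return rest
--     return [head] + [y for y in rest if y != head]
--
--
-- def _candidate_lookup_order(index: dict, state: dict) -> list[str]:
--     ids = [
--         str(state.get("active_candidate_id", "") or ""),
--         str(state.get("last_candidate_id", "") or ""),
--     ] + [
--         str(item.get("candidate_id", "") or "")
--         for item in reversed(list(index.get("candidates", [])))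
--     ]
--     return _dedup(ids)
-- ===== Notes on version B (the rewrite author's own statement) =====
-- stated objective: alternative
-- what changed: B builds one flat candidate-id list and deduplicates it by structural recursion that filters each head's later duplicates out of the recursively deduplicated tail, with no seen-set or dict at all.
import Mathlib
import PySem

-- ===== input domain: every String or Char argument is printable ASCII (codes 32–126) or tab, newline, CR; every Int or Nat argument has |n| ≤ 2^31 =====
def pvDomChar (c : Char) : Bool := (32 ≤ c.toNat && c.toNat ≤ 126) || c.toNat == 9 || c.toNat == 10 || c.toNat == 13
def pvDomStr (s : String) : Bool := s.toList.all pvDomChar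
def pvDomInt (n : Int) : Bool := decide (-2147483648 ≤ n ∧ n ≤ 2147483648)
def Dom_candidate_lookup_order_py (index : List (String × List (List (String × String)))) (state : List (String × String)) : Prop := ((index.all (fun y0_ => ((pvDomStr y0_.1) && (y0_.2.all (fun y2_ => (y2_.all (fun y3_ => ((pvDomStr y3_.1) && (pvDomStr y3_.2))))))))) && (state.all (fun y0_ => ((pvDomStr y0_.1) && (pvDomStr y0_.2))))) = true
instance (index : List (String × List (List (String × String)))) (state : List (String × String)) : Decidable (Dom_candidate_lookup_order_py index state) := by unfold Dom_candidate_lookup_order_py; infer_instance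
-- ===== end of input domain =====

-- B builds one flat id list and deduplicates it by structural recursion that drops
-- each head's later duplicates from the deduped tail — no seen-set or dict
-- (objective: alternative). On String values Python's `str(x or "")` is the
-- identity, so it is ported as the plain dict lookup.

-- ===== PORT A =====
-- the shared body of A's two loops: `if candidate_id and candidate_id not in seen: append; add`
def pvAStep (st : List String × PySem.Set String) (cid : String) : List String × PySem.Set String :=
  if cid ≠ "" ∧ ¬ PySem.Set.contains st.2 cid then (st.1 ++ [cid], PySem.Set.add st.2 cid) else st

def candidate_lookup_order_py (index : List (String × List (List (String × String)))) (state : List (String × String)) : List String :=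
  -- ordered = []; seen = set()
  -- first loop: over the two-element tuple of state lookups
  let st1 := [PySem.Dict.getD ⟨state⟩ "active_candidate_id" "",
              PySem.Dict.getD ⟨state⟩ "last_candidate_id" ""].foldl pvAStep ([], PySem.Set.empty)
  -- second loop: over reversed(list(index.get("candidates", [])))
  let st2 := ((PySem.Dict.getD ⟨index⟩ "candidates" []).reverse.foldl
      (fun st item => pvAStep st (PySem.Dict.getD ⟨item⟩ "candidate_id" "")) st1)
  st2.1

-- ===== PORT B =====
-- Source B's `_dedup`: keep the head, drop its later duplicates from the deduped tail
def pvDedupB : List String → List String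
  | [] => []
  | x :: xs =>
      let rest := pvDedupB xs
      if x = "" then rest else x :: rest.filter (fun y => y ≠ x)

def candidate_lookup_order_py_alt (index : List (String × List (List (String × String)))) (state : List (String × String)) : List String :=
  let ids := [PySem.Dict.getD ⟨state⟩ "active_candidate_id" "",
              PySem.Dict.getD ⟨state⟩ "last_candidate_id" ""]
      ++ (PySem.Dict.getD ⟨index⟩ "candidates" []).reverse.map
           (fun item => PySem.Dict.getD ⟨item⟩ "candidate_id" "")
  pvDedupB ids

-- ===== PRECONDITION & SPEC =====
def Spec_candidate_lookup_order_py (index : List (String × List (List (String × String)))) (state : List (String × String)) (out : List String) : Prop := out = candidate_lookup_order_py_alt index state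
instance (index : List (String × List (List (String × String)))) (state : List (String × String)) (out : List String) : Decidable (Spec_candidate_lookup_order_py index state out) := by unfold Spec_candidate_lookup_order_py; infer_instance

-- ===== CLAIM (what is proved, stated in full; the proofs are below) =====
def Claim_equal_candidate_lookup_order_py : Prop := ∀ (index : List (String × List (List (String × String)))) (state : List (String × String)), Dom_candidate_lookup_order_py index state → Spec_candidate_lookup_order_py index state (candidate_lookup_order_py index state)

-- ===== LEMMAS AND PROOFS =====

-- Set.add only ever appends: the fold starting from s is s ++ (something)
theorem foldl_add_suffix (l : List String) (s : PySem.Set String) :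
    ∃ r, l.foldl PySem.Set.add s = s ++ r := by
  induction l generalizing s with
  | nil => exact ⟨[], (List.append_nil s).symm⟩
  | cons x xs ih =>
    simp only [List.foldl_cons]
    rcases ih (PySem.Set.add s x) with ⟨r, hr⟩
    by_cases h : x ∈ s
    · exact ⟨r, by rwa [show PySem.Set.add s x = s by simp [PySem.Set.add, h]] at hr ⊢⟩
    · refine ⟨x :: r, ?_⟩
      rw [show PySem.Set.add s x = s ++ [x] by simp [PySem.Set.add, h]] at hr ⊢
      rw [hr]; simp

-- main invariant for A: A's fold is the add-fold on the filtered list, minus the already-seen prefix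
theorem pvAStep_foldl (l : List String) (ord : List String) (s : PySem.Set String) :
    l.foldl pvAStep (ord, s) =
      (ord ++ ((l.filter (fun i => i ≠ "")).foldl PySem.Set.add s).drop s.length,
       (l.filter (fun i => i ≠ "")).foldl PySem.Set.add s) := by
  induction l generalizing ord s with
  | nil => simp
  | cons x xs ih =>
    by_cases hx : x = ""
    · rw [List.foldl_cons, List.filter_cons_of_neg (by simp [hx]),
          show pvAStep (ord, s) x = (ord, s) by simp [pvAStep, hx]]
      exact ih ord s
    · rw [List.foldl_cons, List.filter_cons_of_pos (by simp [hx]), List.foldl_cons]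
      by_cases hm : x ∈ s
      · rw [show pvAStep (ord, s) x = (ord, s) by simp [pvAStep, hx, hm],
            show PySem.Set.add s x = s by simp [PySem.Set.add, hm]]
        exact ih ord s
      · rw [show pvAStep (ord, s) x = (ord ++ [x], PySem.Set.add s x) by simp [pvAStep, hx, hm],
            ih (ord ++ [x]) (PySem.Set.add s x),
            show PySem.Set.add s x = s ++ [x] by simp [PySem.Set.add, hm]]
        obtain ⟨r, hr⟩ := foldl_add_suffix (xs.filter (fun i => i ≠ "")) (s ++ [x])
        rw [hr]
        refine Prod.ext ?_ rfl
        rw [List.drop_left, List.append_assoc s [x] r, List.drop_left]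
        simp

-- A's second loop, recast as a fold over the pre-extracted ids
theorem foldl_getD_map (l : List (List (String × String))) (st : List String × PySem.Set String) :
    l.foldl (fun st item => pvAStep st (PySem.Dict.getD ⟨item⟩ "candidate_id" "")) st
      = (l.map (fun item => PySem.Dict.getD ⟨item⟩ "candidate_id" "")).foldl pvAStep st := by
  induction l generalizing st with
  | nil => rfl
  | cons x xs ih => simp only [List.foldl_cons, List.map_cons, ih]

-- the add-fold from any start s is the from-empty fold with the s-members filtered out
theorem foldl_add_filter (l : List String) (s : List String) :
    l.foldl PySem.Set.add s = s ++ (l.foldl PySem.Set.add []).filter (fun y => y ∉ s) := by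
  induction l generalizing s with
  | nil => simp
  | cons x xs ih =>
    simp only [List.foldl_cons]
    rw [ih (PySem.Set.add s x), ih (PySem.Set.add [] x)]
    by_cases hm : x ∈ s
    · rw [show PySem.Set.add s x = s by simp [PySem.Set.add, hm],
          show PySem.Set.add ([] : List String) x = [x] by simp [PySem.Set.add]]
      rw [List.filter_append,
          show List.filter (fun y => decide (y ∉ s)) [x] = [] by simp [hm],
          List.nil_append, List.filter_filter]
      congr 1
      apply List.filter_congr
      intro y _
      by_cases hy : y ∈ s
      · simp [hy]
      · have hyx : y ≠ x := fun h => hy (h ▸ hm)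
        simp [hy, hyx]
    · rw [show PySem.Set.add s x = s ++ [x] by simp [PySem.Set.add, hm],
          show PySem.Set.add ([] : List String) x = [x] by simp [PySem.Set.add]]
      rw [List.filter_append,
          show List.filter (fun y => decide (y ∉ s)) [x] = [x] by simp [hm],
          List.filter_filter, List.append_assoc]
      congr 2
      apply List.filter_congr
      intro y _
      by_cases hy : y ∈ s <;> by_cases hx2 : y = x <;> simp [hy, hx2, List.mem_append]

-- first-occurrence dedup, unfolded one step
theorem ofList_cons (x : String) (xs : List String) :
    PySem.Set.ofList (x :: xs) = x :: (PySem.Set.ofList xs).filter (fun y => y ≠ x) := by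
  rw [PySem.Set.ofList_eq_foldl, PySem.Set.ofList_eq_foldl, List.foldl_cons,
      show PySem.Set.add ([] : List String) x = [x] by simp [PySem.Set.add],
      foldl_add_filter]
  simp

-- Source B's recursion computes the first-occurrence dedup of the nonempty ids
theorem pvDedupB_eq (l : List String) :
    pvDedupB l = PySem.Set.ofList (l.filter (fun i => i ≠ "")) := by
  induction l with
  | nil => simp [pvDedupB, PySem.Set.ofList_eq_foldl]
  | cons x xs ih =>
    by_cases hx : x = ""
    · rw [show pvDedupB (x :: xs) = pvDedupB xs by simp [pvDedupB, hx],
          List.filter_cons_of_neg (by simp [hx])]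
      exact ih
    · rw [show pvDedupB (x :: xs) = x :: (pvDedupB xs).filter (fun y => y ≠ x) by
            simp [pvDedupB, hx],
          List.filter_cons_of_pos (by simp [hx]), ofList_cons, ih]

-- ===== VERDICT (by name: the statement is the Claim_ definition above) =====
theorem candidate_lookup_order_py_spec : Claim_equal_candidate_lookup_order_py := by
  intro index state _
  unfold Spec_candidate_lookup_order_py
  simp only [candidate_lookup_order_py, candidate_lookup_order_py_alt]
  rw [foldl_getD_map, ← List.foldl_append, pvAStep_foldl, pvDedupB_eq]
  simp [PySem.Set.ofList_eq_foldl, PySem.Set.empty]
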